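-- pv_equiv track=rewrite | github.com/levilucio/SyVOLT | PropertyVerification/ContractProver.py | find_smallest_pc
-- ===== SOURCE A (Python) =====
-- def find_smallest_pc(pc_names):
--     smallest = []
--     smallestSize = 0
--
--     for pc_name in pc_names:
--         sizeCounter = len(pc_name.split("_"))
--         if smallestSize == 0:
--             smallest.append(pc_name)
--             smallestSize = sizeCounter
--         else:
--             if sizeCounter < smallestSize:
--                 smallest = [pc_name]
--                 smallestSize = sizeCounter
--             elif sizeCounter == smallestSize:
--                 smallest.append(pc_name)
--
--     return smallest
-- ===== SOURCE B (Python) =====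
-- def find_smallest_pc(pc_names):
--     if not pc_names:
--         return []
--     m = min(len(x.split("_")) for x in pc_names)
--     return [x for x in pc_names if len(x.split("_")) == m]
-- ===== Notes on version B (the rewrite author's own statement) =====
-- stated objective: simpler
-- what changed: Replaces the fused running-min-plus-conditional-accumulator loop (with reset on a new minimum) by a two-pass min-then-filter decomposition.
import Mathlib
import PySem

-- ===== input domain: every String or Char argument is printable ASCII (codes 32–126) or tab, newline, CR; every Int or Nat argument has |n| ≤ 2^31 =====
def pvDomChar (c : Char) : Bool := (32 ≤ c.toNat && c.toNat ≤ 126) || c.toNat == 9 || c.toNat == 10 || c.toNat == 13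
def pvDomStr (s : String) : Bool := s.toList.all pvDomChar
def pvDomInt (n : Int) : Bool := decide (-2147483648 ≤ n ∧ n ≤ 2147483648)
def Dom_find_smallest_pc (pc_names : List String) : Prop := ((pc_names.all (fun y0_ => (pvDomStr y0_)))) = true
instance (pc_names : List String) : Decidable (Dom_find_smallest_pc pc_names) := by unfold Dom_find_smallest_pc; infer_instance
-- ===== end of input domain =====

-- B replaces A's fused running-min accumulator loop (with reset on a new minimum)
-- by a min pass followed by a filter pass (objective: simpler).

-- len(x.split("_")): the separator is the non-empty literal "_", so Python's split
-- never raises; PySem.Chars.splitOn is the sep ≠ "" form of split.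
def pvSplitLen (s : String) : Int :=
  ((PySem.Chars.splitOn s.toList "_".toList).length : Int)

-- ===== PORT A =====
-- A's loop body, step for step (branch order preserved)
def pvStepA (st : List String × Int) (pc_name : String) : List String × Int :=
  let sizeCounter := pvSplitLen pc_name
  if st.2 == 0 then
    (st.1 ++ [pc_name], sizeCounter)
  else if sizeCounter < st.2 then
    ([pc_name], sizeCounter)
  else if sizeCounter == st.2 then
    (st.1 ++ [pc_name], st.2)
  else
    st

def find_smallest_pc (pc_names : List String) : List String :=
  (pc_names.foldl pvStepA ([], 0)).1

-- ===== PORT B =====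
def find_smallest_pc_alt (pc_names : List String) : List String :=
  match pc_names with
  | [] => []
  | h :: t =>
    let m := t.foldl (fun a x => min a (pvSplitLen x)) (pvSplitLen h)
    (h :: t).filter (fun x => pvSplitLen x == m)

-- ===== PRECONDITION & SPEC =====
def Spec_find_smallest_pc (pc_names : List String) (out : List String) : Prop := out = find_smallest_pc_alt pc_names
instance (pc_names : List String) (out : List String) : Decidable (Spec_find_smallest_pc pc_names out) := by unfold Spec_find_smallest_pc; infer_instance

-- ===== CLAIM (what is proved, stated in full; the proofs are below) =====
def Claim_equal_find_smallest_pc : Prop := ∀ (pc_names : List String), Dom_find_smallest_pc pc_names → Spec_find_smallest_pc pc_names (find_smallest_pc pc_names)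

-- ===== LEMMAS AND PROOFS =====

-- splitOn's worker never returns the empty list
theorem pvGo_ne_nil (sep : List Char) (fuel : Nat) (l cur : List Char) (acc : List (List Char)) :
    PySem.Chars.splitOn.go sep fuel l cur acc ≠ [] := by
  induction fuel generalizing l cur acc with
  | zero => simp [PySem.Chars.splitOn.go]
  | succ n ih =>
    cases l with
    | nil => simp [PySem.Chars.splitOn.go]
    | cons c rest =>
      rw [PySem.Chars.splitOn.go]
      split
      · exact ih _ _ _
      · exact ih _ _ _

theorem pvSplitLen_pos (s : String) : 1 ≤ pvSplitLen s := by
  unfold pvSplitLen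
  have h := pvGo_ne_nil "_".toList (s.toList.length + 1) s.toList [] []
  rw [PySem.Chars.splitOn] at *
  have : (PySem.Chars.splitOn.go "_".toList (s.toList.length + 1) s.toList [] []).length ≠ 0 :=
    fun hc => h (List.length_eq_zero_iff.mp hc)
  omega

theorem pvFoldl_min_le (xs : List String) (m : Int) :
    xs.foldl (fun a x => min a (pvSplitLen x)) m ≤ m := by
  induction xs generalizing m with
  | nil => simp
  | cons x xs ih =>
    simp only [List.foldl_cons]
    exact le_trans (ih _) (min_le_left _ _)

-- invariant of A's loop from any state (acc, m) with 1 ≤ m: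
-- the final list is the filter at the final running minimum, the kept prefix
-- surviving exactly when the minimum never dropped below m
theorem pvLoop_lemma (rest : List String) (acc : List String) (m : Int) (hm : 1 ≤ m) :
    rest.foldl pvStepA (acc, m) =
      ((if rest.foldl (fun a x => min a (pvSplitLen x)) m = m then acc else []) ++
        rest.filter (fun x => pvSplitLen x == rest.foldl (fun a x => min a (pvSplitLen x)) m),
       rest.foldl (fun a x => min a (pvSplitLen x)) m) := by
  induction rest generalizing acc m with
  | nil => simp
  | cons x xs ih =>
    have hkx := pvSplitLen_pos x
    have hm0 : (m == 0) = false := by simp; omega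
    simp only [List.foldl_cons]
    rcases lt_trichotomy (pvSplitLen x) m with hlt | heq | hgt
    · have hstep : pvStepA (acc, m) x = ([x], pvSplitLen x) := by
        simp [pvStepA, hm0, hlt]
      rw [hstep, ih _ _ hkx]
      have hmin : min m (pvSplitLen x) = pvSplitLen x := by omega
      simp only [hmin]
      have hM := pvFoldl_min_le xs (pvSplitLen x)
      have hne : xs.foldl (fun a x => min a (pvSplitLen x)) (pvSplitLen x) ≠ m := by omega
      simp only [List.filter_cons, if_neg hne]
      by_cases hc : xs.foldl (fun a x => min a (pvSplitLen x)) (pvSplitLen x) = pvSplitLen x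
      · simp [hc]
      · have : (pvSplitLen x == xs.foldl (fun a x => min a (pvSplitLen x)) (pvSplitLen x)) = false := by
          simp; omega
        simp [hc, this]
    · have hstep : pvStepA (acc, m) x = (acc ++ [x], m) := by
        simp [pvStepA, hm0, heq]
      rw [hstep, ih _ _ hm]
      have hmin : min m (pvSplitLen x) = m := by omega
      simp only [hmin, List.filter_cons]
      by_cases hc : xs.foldl (fun a x => min a (pvSplitLen x)) m = m
      · simp [hc, heq]
      · have : (pvSplitLen x == xs.foldl (fun a x => min a (pvSplitLen x)) m) = false := by
          have := pvFoldl_min_le xs m; simp; omega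
        simp [hc, this]
    · have h1 : ¬(pvSplitLen x < m) := by omega
      have h2 : (pvSplitLen x == m) = false := by simp; omega
      have hstep : pvStepA (acc, m) x = (acc, m) := by
        simp [pvStepA, hm0, h1, h2]
      rw [hstep, ih _ _ hm]
      have hmin : min m (pvSplitLen x) = m := by omega
      simp only [hmin]
      have : (pvSplitLen x == xs.foldl (fun a x => min a (pvSplitLen x)) m) = false := by
        have := pvFoldl_min_le xs m; simp; omega
      simp [this]

-- ===== VERDICT (by name: the statement is the Claim_ definition above) =====
theorem find_smallest_pc_spec : Claim_equal_find_smallest_pc := by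
  intro pc_names _
  unfold Spec_find_smallest_pc
  cases pc_names with
  | nil => rfl
  | cons h t =>
    unfold find_smallest_pc find_smallest_pc_alt
    simp only [List.foldl_cons]
    have hstep : pvStepA ([], 0) h = ([h], pvSplitLen h) := by
      simp [pvStepA]
    rw [hstep, pvLoop_lemma t [h] (pvSplitLen h) (pvSplitLen_pos h)]
    simp only [List.filter_cons]
    by_cases hc : t.foldl (fun a x => min a (pvSplitLen x)) (pvSplitLen h) = pvSplitLen h
    · simp [hc]
    · have : (pvSplitLen h == t.foldl (fun a x => min a (pvSplitLen x)) (pvSplitLen h)) = false := by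
        simp; omega
      simp [hc, this]
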